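-- pv_equiv track=rewrite | github.com/rowangriffioen/causal_deviance_mining | models/CRM_random_k2.py | ismixedcontrollable
-- ===== SOURCE A (Python) =====
-- def ismixedcontrollable(LHS,controllable_variables):
--     # true if LHS contains at least one controllable and one noncontrollable variable
--     foundcontrollable=False
--     foundnoncontrollable=False
--     for I in LHS:
--         if I not in controllable_variables:
--             foundnoncontrollable=True
--         if I in controllable_variables:
--             foundcontrollable=True
--     return (foundcontrollable and foundnoncontrollable)
-- ===== SOURCE B (Python) =====
-- def ismixedcontrollable(LHS, controllable_variables):
--     # set algebra: nonempty intersection = some controllable present,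
--     # nonempty difference = some noncontrollable present
--     s = set(LHS)
--     cv = set(controllable_variables)
--     return bool(s & cv) and bool(s - cv)
-- ===== Notes on version B (the rewrite author's own statement) =====
-- stated objective: faster
-- what changed: Replaces the element-by-element scan over LHS with repeated linear 'in list' membership tests by building sets once and testing nonemptiness of the intersection (controllable present) and the set difference (noncontrollable present).
import Mathlib
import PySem

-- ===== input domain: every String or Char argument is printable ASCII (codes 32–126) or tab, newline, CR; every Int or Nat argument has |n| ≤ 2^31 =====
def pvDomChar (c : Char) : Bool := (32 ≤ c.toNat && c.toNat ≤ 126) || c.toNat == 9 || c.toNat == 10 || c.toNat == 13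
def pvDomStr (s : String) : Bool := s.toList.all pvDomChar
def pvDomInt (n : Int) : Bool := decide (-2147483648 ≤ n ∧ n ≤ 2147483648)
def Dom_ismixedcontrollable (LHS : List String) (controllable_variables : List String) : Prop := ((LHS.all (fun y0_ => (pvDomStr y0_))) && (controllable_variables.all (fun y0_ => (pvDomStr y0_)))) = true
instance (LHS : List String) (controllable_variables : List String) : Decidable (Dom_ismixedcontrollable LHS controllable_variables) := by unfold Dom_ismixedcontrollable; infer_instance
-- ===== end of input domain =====

-- ===== PORT A =====
-- Port of A: one pass over LHS maintaining the two flags (foundcontrollable, foundnoncontrollable).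
def ismixedcontrollable (LHS : List String) (controllable_variables : List String) : Bool :=
  let st := LHS.foldl (fun (st : Bool × Bool) I =>
    let fnc := if !(controllable_variables.contains I) then true else st.2
    let fc := if controllable_variables.contains I then true else st.1
    (fc, fnc)) (false, false)
  st.1 && st.2

-- ===== PORT B =====
-- Port of B: set intersection / difference nonemptiness.
def ismixedcontrollable_alt (LHS : List String) (controllable_variables : List String) : Bool :=
  let s := PySem.Set.ofList LHS
  let cv := PySem.Set.ofList controllable_variables
  !(PySem.Set.inter s cv).isEmpty && !(PySem.Set.diff s cv).isEmpty

-- ===== PRECONDITION & SPEC =====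
def Spec_ismixedcontrollable (LHS : List String) (controllable_variables : List String) (out : Bool) : Prop := out = ismixedcontrollable_alt LHS controllable_variables
instance (LHS : List String) (controllable_variables : List String) (out : Bool) : Decidable (Spec_ismixedcontrollable LHS controllable_variables out) := by unfold Spec_ismixedcontrollable; infer_instance

-- ===== CLAIM (what is proved, stated in full; the proofs are below) =====
def Claim_equal_ismixedcontrollable : Prop := ∀ (LHS : List String) (controllable_variables : List String), Dom_ismixedcontrollable LHS controllable_variables → Spec_ismixedcontrollable LHS controllable_variables (ismixedcontrollable LHS controllable_variables)

-- ===== LEMMAS AND PROOFS =====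

lemma fold_flags (cv : List String) (LHS : List String) (b c : Bool) :
    LHS.foldl (fun (st : Bool × Bool) I =>
      let fnc := if !(cv.contains I) then true else st.2
      let fc := if cv.contains I then true else st.1
      (fc, fnc)) (b, c)
    = (b || LHS.any (fun I => cv.contains I), c || LHS.any (fun I => !(cv.contains I))) := by
  induction LHS generalizing b c with
  | nil => simp
  | cons x xs ih =>
    simp only [List.foldl_cons, List.any_cons, ih]
    by_cases h : cv.contains x = true <;>
      · simp only [h, Bool.not_true, Bool.not_false, if_true, Prod.mk.injEq]
        constructor <;> (cases b <;> cases c <;> simp)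

lemma alt_char (LHS cv : List String) :
    ismixedcontrollable_alt LHS cv
    = (LHS.any (fun I => cv.contains I) && LHS.any (fun I => !(cv.contains I))) := by
  unfold ismixedcontrollable_alt
  rw [Bool.eq_iff_iff]
  simp only [Bool.and_eq_true, List.any_eq_true, Bool.not_eq_true',
    List.isEmpty_eq_false_iff, ne_eq, List.eq_nil_iff_forall_not_mem, not_forall, not_not,
    PySem.Set.mem_inter, PySem.Set.mem_diff, PySem.Set.mem_ofList,
    List.contains_iff_mem]
  simp only [show ∀ (l : List String) (x : String), (l.contains x = false) ↔ x ∉ l from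
    fun l x => by simp]

-- ===== VERDICT (by name: the statement is the Claim_ definition above) =====
theorem ismixedcontrollable_spec : Claim_equal_ismixedcontrollable := by
  intro LHS cv _
  unfold Spec_ismixedcontrollable ismixedcontrollable
  rw [alt_char, fold_flags]
  simp
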